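-- pv_equiv track=rewrite | github.com/UsernameUser777/4-source-Information-protection-1-semester | Лабораторная работа №2/Lab 2 (7 task) (modified) (2025) (full)/main.py | double_permutation_decrypt
-- ===== SOURCE A (Python) =====
-- def double_permutation_decrypt(ciphertext, col_key_word, row_key_word):
--     """
--     Дешифрует текст, зашифрованный шифром двойной перестановки.
--
--     Процесс дешифрования обратен шифрованию:
--     1.  Определяется количество столбцов n_cols (длина col_key_word) и строк n_rows (длина row_key_word).
--     2.  Проверяется, совпадает ли длина шифротекста с n_rows * n_cols.
--     3.  Создается пустая виртуальная таблица размером n_rows x n_cols.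
--     4.  Зашифрованный текст записывается в таблицу в фиксированном порядке
--         (например, по строкам), восстанавливая финальную таблицу после шифрования.
--     5.  Выполняется *обратная* перестановка строк.
--         Определяется порядок, в котором строки *были* переставлены при шифровании (sorted_row_indices).
--         Создается *обратный* порядок: inverse_row_order[sorted_row_idx] = original_row_idx.
--         Затем строки таблицы переставляются обратно по этому обратному порядку.
--     6.  Выполняется *обратная* перестановка столбцов.
--         Определяется порядок, в котором столбцы *были* переставлены при шифровании (sorted_col_indices).
--         Создается *обратный* порядок: inverse_col_order[sorted_col_idx] = original_col_idx.
--         Затем столбцы таблицы переставляются обратно по этому обратному порядку.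
--     7.  Восстановленный текст формируется путем считывания символов из таблицы
--         по строкам, слева направо, сверху вниз.
--
--     :param ciphertext: Зашифрованный текст (str).
--     :param col_key_word: Ключевое слово для перестановки столбцов, использованное при шифровании (str).
--     :param row_key_word: Ключевое слово для перестановки строк, использованное при шифровании (str).
--     :return: str: Восстановленный (дешифрованный) текст.
--     """
--     # Проверяем, что оба ключевых слова не пустые
--     if not col_key_word or not row_key_word:
--         return ciphertext
--
--     n_cols = len(col_key_word)
--     n_rows = len(row_key_word)
--
--     # Проверяем, совпадает ли длина шифротекста с размером таблицы
--     if len(ciphertext) != n_rows * n_cols: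
--         raise ValueError("Длина зашифрованного текста не соответствует размеру таблицы (n_rows * n_cols).")
--
--     # --- Восстанавливаем финальную таблицу из шифротекста (по строкам) ---
--     table = [['' for _ in range(n_cols)] for _ in range(n_rows)]
--     index = 0
--     for r in range(n_rows):
--         for c in range(n_cols):
--             table[r][c] = ciphertext[index]
--             index += 1
--
--     # --- Обратная перестановка строк ---
--     # Определяем порядок, в котором строки были переставлены при шифровании
--     sorted_row_indices = sorted(range(n_rows), key=lambda k: row_key_word[k])
--     # Создаем обратный порядок: индекс в отсортированном списке -> индекс строки в таблице
--     inverse_row_order = [0] * n_rows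
--     for i, original_row_idx in enumerate(sorted_row_indices):
--         inverse_row_order[original_row_idx] = i
--
--     # Создаем таблицу после обратной перестановки строк
--     table_after_row_unperm = [['' for _ in range(n_cols)] for _ in range(n_rows)]
--     for new_row_idx, old_row_idx in enumerate(inverse_row_order):
--         table_after_row_unperm[new_row_idx] = table[old_row_idx][:]
--
--     # --- Обратная перестановка столбцов ---
--     # Определяем порядок, в котором столбцы были переставлены при шифровании
--     sorted_col_indices = sorted(range(n_cols), key=lambda k: col_key_word[k])
--     # Создаем обратный порядок: индекс в отсортированном списке -> индекс столбца в таблице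
--     inverse_col_order = [0] * n_cols
--     for i, original_col_idx in enumerate(sorted_col_indices):
--         inverse_col_order[original_col_idx] = i
--
--     # Создаем таблицу после обратной перестановки столбцов (исходная таблица до шифрования)
--     original_table = [['' for _ in range(n_cols)] for _ in range(n_rows)]
--     for r in range(n_rows):
--         for new_col_idx, old_col_idx in enumerate(inverse_col_order):
--             original_table[r][new_col_idx] = table_after_row_unperm[r][old_col_idx]
--
--     # --- Формируем восстановленный текст из исходной таблицы (по строкам) ---
--     decrypted_chars = []
--     for r in range(n_rows):
--         for c in range(n_cols):
--             decrypted_chars.append(original_table[r][c])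
--
--     # Восстановленный текст (включая добавленные пробелы)
--     decrypted_text_with_padding = ''.join(decrypted_chars)
--     # Удаляем пробелы в конце, которые были добавлены при шифровании
--     return decrypted_text_with_padding.rstrip(' ')
-- ===== SOURCE B (Python) =====
-- def double_permutation_decrypt(ciphertext, col_key_word, row_key_word):
--     # Decrypt by composed-index readout: rank dicts give the inverse permutations
--     # and each output character is read directly from the ciphertext.
--     if not col_key_word or not row_key_word:
--         return ciphertext
--     n_cols = len(col_key_word)
--     n_rows = len(row_key_word)
--     if len(ciphertext) != n_rows * n_cols:
--         raise ValueError("Длина зашифрованного текста не соответствует размеру таблицы (n_rows * n_cols).")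
--     inv_row = {orig: i for i, orig in enumerate(sorted(range(n_rows), key=lambda k: row_key_word[k]))}
--     inv_col = {orig: i for i, orig in enumerate(sorted(range(n_cols), key=lambda k: col_key_word[k]))}
--     out = ''.join(ciphertext[inv_row[r] * n_cols + inv_col[c]]
--                   for r in range(n_rows) for c in range(n_cols))
--     return out.rstrip(' ')
-- ===== Notes on version B (the rewrite author's own statement) =====
-- stated objective: simpler
-- what changed: B drops A's three intermediate tables and their copy loops: it builds the two inverse permutations as rank dictionaries (orig -> position in the sorted key order) and emits each output character directly from ciphertext[inv_row[r]*n_cols + inv_col[c]] in one pass, then rstrip(' ').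
import Mathlib
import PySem

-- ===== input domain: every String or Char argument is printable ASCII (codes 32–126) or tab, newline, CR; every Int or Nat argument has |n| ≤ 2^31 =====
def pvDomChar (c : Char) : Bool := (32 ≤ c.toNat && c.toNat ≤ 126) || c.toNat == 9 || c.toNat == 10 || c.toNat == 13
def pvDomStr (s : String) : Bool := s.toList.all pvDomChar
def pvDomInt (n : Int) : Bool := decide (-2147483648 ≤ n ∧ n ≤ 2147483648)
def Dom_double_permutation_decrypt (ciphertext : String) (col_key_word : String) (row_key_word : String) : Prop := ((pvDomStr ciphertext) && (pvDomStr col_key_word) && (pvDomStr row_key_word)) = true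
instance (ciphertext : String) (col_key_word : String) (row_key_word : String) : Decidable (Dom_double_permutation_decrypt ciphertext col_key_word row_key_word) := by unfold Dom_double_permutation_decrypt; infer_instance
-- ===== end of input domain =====

-- B replaces A's three intermediate tables and their copy loops by two rank dictionaries and a
-- single composed-index readout of the ciphertext (objective: simpler; same O(n_rows*n_cols) cost).

-- exact port of str.rstrip(' '): drop trailing SPACE characters only (PySem.Str.rstrip strips all whitespace)
def pyRstripSpace (l : List Char) : List Char := (l.reverse.dropWhile (fun c => c == ' ')).reverse

-- ===== PORT A =====
-- main branch of A (keys non-empty, length matches); loops rendered as folds over the same state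
def pyAmain (ct ck rk : List Char) : List Char :=
  let n_cols : Nat := ck.length
  let n_rows : Nat := rk.length
  -- table[r][c] = ciphertext[index], index running over the cells in row-major order
  let fill := (PySem.List.pyRange 0 n_rows).foldl
      (fun (st : List (List Char) × Int) _r =>
        let inner := (PySem.List.pyRange 0 n_cols).foldl
          (fun (st2 : List Char × Int) _c =>
            (st2.1 ++ [PySem.List.pyGetD ct st2.2 ' '], st2.2 + 1)) ([], st.2)
        (st.1 ++ [inner.1], inner.2))
      ([], 0)
  let table := fill.1
  let sorted_row_indices := PySem.List.sorted (PySem.List.pyRange 0 n_rows) (fun k => PySem.List.pyGetD rk k ' ')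
  -- inverse_row_order = [0]*n_rows; inverse_row_order[orig] = i
  let inverse_row_order := (PySem.List.enumerate sorted_row_indices).foldl
      (fun inv p => PySem.List.pySetD inv p.2 p.1) (List.replicate n_rows (0 : Int))
  -- table_after_row_unperm[new] = table[old][:]
  let table_after := (PySem.List.enumerate inverse_row_order).foldl
      (fun t p => PySem.List.pySetD t p.1 (PySem.List.pyGetD table p.2 []))
      (List.replicate n_rows (List.replicate n_cols ' '))
  let sorted_col_indices := PySem.List.sorted (PySem.List.pyRange 0 n_cols) (fun k => PySem.List.pyGetD ck k ' ')
  let inverse_col_order := (PySem.List.enumerate sorted_col_indices).foldl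
      (fun inv p => PySem.List.pySetD inv p.2 p.1) (List.replicate n_cols (0 : Int))
  -- original_table[r][new] = table_after[r][old]
  let original_table := (PySem.List.pyRange 0 n_rows).foldl
      (fun t r => PySem.List.pySetD t r
        ((PySem.List.enumerate inverse_col_order).foldl
          (fun row p => PySem.List.pySetD row p.1 (PySem.List.pyGetD (PySem.List.pyGetD table_after r []) p.2 ' '))
          (PySem.List.pyGetD t r [])))
      (List.replicate n_rows (List.replicate n_cols ' '))
  -- decrypted_chars: read original_table row by row
  (PySem.List.pyRange 0 n_rows).foldl
    (fun acc r => (PySem.List.pyRange 0 n_cols).foldl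
      (fun acc2 c => acc2 ++ [PySem.List.pyGetD (PySem.List.pyGetD original_table r []) c ' ']) acc) []

def double_permutation_decrypt (ciphertext : String) (col_key_word : String) (row_key_word : String) : String :=
  if col_key_word.toList = [] ∨ row_key_word.toList = [] then ciphertext
  else if ciphertext.toList.length ≠ row_key_word.toList.length * col_key_word.toList.length then
    ""  -- Python raises ValueError here; excluded by Pre_
  else String.ofList (pyRstripSpace (pyAmain ciphertext.toList col_key_word.toList row_key_word.toList))

-- ===== PORT B =====
-- main branch of B: rank dicts inv_row/inv_col, then one composed-index readout
def pyBmain (ct ck rk : List Char) : List Char :=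
  let n_cols : Nat := ck.length
  let n_rows : Nat := rk.length
  let inv_row := (PySem.List.enumerate
      (PySem.List.sorted (PySem.List.pyRange 0 n_rows) (fun k => PySem.List.pyGetD rk k ' '))).foldl
      (fun d p => d.insert p.2 p.1) (PySem.Dict.empty : PySem.Dict Int Int)
  let inv_col := (PySem.List.enumerate
      (PySem.List.sorted (PySem.List.pyRange 0 n_cols) (fun k => PySem.List.pyGetD ck k ' '))).foldl
      (fun d p => d.insert p.2 p.1) (PySem.Dict.empty : PySem.Dict Int Int)
  (PySem.List.pyRange 0 n_rows).foldl
    (fun acc r => acc ++ (PySem.List.pyRange 0 n_cols).map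
      (fun c => PySem.List.pyGetD ct (inv_row.getD r 0 * n_cols + inv_col.getD c 0) ' ')) []

def double_permutation_decrypt_alt (ciphertext : String) (col_key_word : String) (row_key_word : String) : String :=
  if col_key_word.toList = [] ∨ row_key_word.toList = [] then ciphertext
  else if ciphertext.toList.length ≠ row_key_word.toList.length * col_key_word.toList.length then
    ""  -- Python raises ValueError here too
  else String.ofList (pyRstripSpace (pyBmain ciphertext.toList col_key_word.toList row_key_word.toList))

-- ===== PRECONDITION & SPEC =====
-- Pre_ excludes exactly the inputs where A raises ValueError: non-empty keys whose grid size
-- differs from the ciphertext length (B raises the same ValueError there).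
def Pre_double_permutation_decrypt (ciphertext : String) (col_key_word : String) (row_key_word : String) : Prop :=
  (col_key_word.toList ≠ [] ∧ row_key_word.toList ≠ []) →
    ciphertext.toList.length = row_key_word.toList.length * col_key_word.toList.length
instance (ciphertext : String) (col_key_word : String) (row_key_word : String) : Decidable (Pre_double_permutation_decrypt ciphertext col_key_word row_key_word) := by unfold Pre_double_permutation_decrypt; infer_instance
def pvWitness_double_permutation_decrypt : String × String × String := ("HELLOX", "ab", "cba")

def Spec_double_permutation_decrypt (ciphertext : String) (col_key_word : String) (row_key_word : String) (out : String) : Prop := out = double_permutation_decrypt_alt ciphertext col_key_word row_key_word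
instance (ciphertext : String) (col_key_word : String) (row_key_word : String) (out : String) : Decidable (Spec_double_permutation_decrypt ciphertext col_key_word row_key_word out) := by unfold Spec_double_permutation_decrypt; infer_instance

-- ===== CLAIM (what is proved, stated in full; the proofs are below) =====
def Claim_equal_double_permutation_decrypt : Prop := ∀ (ciphertext : String) (col_key_word : String) (row_key_word : String), Dom_double_permutation_decrypt ciphertext col_key_word row_key_word → Pre_double_permutation_decrypt ciphertext col_key_word row_key_word → Spec_double_permutation_decrypt ciphertext col_key_word row_key_word (double_permutation_decrypt ciphertext col_key_word row_key_word)

-- ===== LEMMAS AND PROOFS =====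

-- pySetD at an in-range Nat index is List.set
theorem pySetD_nat {α : Type} (xs : List α) (n : Nat) (v : α) (h : n < xs.length) :
    PySem.List.pySetD xs (n : Int) v = xs.set n v := by
  simp [PySem.List.pySetD, PySem.List.pySet?, PySem.List.pyIdx?, h]

theorem mem_pySetD {α : Type} {x : α} {xs : List α} {i : Int} {v : α}
    (h : x ∈ PySem.List.pySetD xs i v) : x ∈ xs ∨ x = v := by
  unfold PySem.List.pySetD PySem.List.pySet? at h
  cases hi : PySem.List.pyIdx? xs.length i with
  | none => rw [hi] at h; simp at h; exact Or.inl h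
  | some k => rw [hi] at h; simp at h; exact List.mem_or_eq_of_mem_set h

theorem length_foldl_pySetD {α β : Type} (ps : List β) (k : β → Int) (v : β → α) (acc : List α) :
    (ps.foldl (fun a p => PySem.List.pySetD a (k p) (v p)) acc).length = acc.length := by
  induction ps generalizing acc with
  | nil => rfl
  | cons p ps ih => simp [List.foldl_cons, ih, PySem.List.length_pySetD]

theorem foldl_pySetD_inv {P : Int → Prop} :
    ∀ (ps : List (Int × Int)) (acc : List Int),
      (∀ x ∈ acc, P x) → (∀ p ∈ ps, P p.1) →
      ∀ x ∈ ps.foldl (fun a p => PySem.List.pySetD a p.2 p.1) acc, P x := by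
  intro ps
  induction ps with
  | nil => intro acc ha _ x hx; exact ha x hx
  | cons p ps ih =>
    intro acc ha hp x hx
    refine ih _ ?_ (fun q hq => hp q (List.mem_cons_of_mem _ hq)) x hx
    intro y hy
    rcases mem_pySetD hy with h | h
    · exact ha y h
    · exact h ▸ hp p List.mem_cons_self

-- the list-with-pySetD build and the dict build agree on in-range lookups
theorem foldl_pySetD_dict_agree :
    ∀ (ps : List (Int × Int)) (inv : List Int) (d : PySem.Dict Int Int),
      (∀ p ∈ ps, 0 ≤ p.2 ∧ p.2 < (inv.length : Int)) →
      (∀ j : Nat, j < inv.length → PySem.List.pyGetD inv (j : Int) 0 = d.getD (j : Int) 0) →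
      ∀ j : Nat, j < inv.length →
        PySem.List.pyGetD (ps.foldl (fun a p => PySem.List.pySetD a p.2 p.1) inv) (j : Int) 0
          = (ps.foldl (fun a p => a.insert p.2 p.1) d).getD (j : Int) 0 := by
  intro ps
  induction ps with
  | nil => intro inv d _ hagree j hj; exact hagree j hj
  | cons p ps ih =>
    intro inv d hrange hagree j hj
    simp only [List.foldl_cons]
    have hp := hrange p List.mem_cons_self
    have hlen : (PySem.List.pySetD inv p.2 p.1).length = inv.length :=
      PySem.List.length_pySetD _ _ _
    refine ih _ _ (fun q hq => by
        simpa [hlen] using hrange q (List.mem_cons_of_mem _ hq)) ?_ j (by omega)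
    intro j' hj'
    have hk : p.2 = ((p.2.toNat : Nat) : Int) := by omega
    rw [hk, PySem.List.pyGetD_pySetD_natCast inv p.2.toNat j' p.1 0 (by omega),
      PySem.Dict.getD_insert]
    by_cases h : j' = p.2.toNat
    · have h2 : (j' : Int) = ((p.2.toNat : Nat) : Int) := by omega
      rw [if_pos h, if_pos h2]
    · have h2 : ¬ ((j' : Int) = ((p.2.toNat : Nat) : Int)) := by omega
      rw [if_neg h, if_neg h2, hagree j' (by omega)]

-- filling one row: appends the next n ciphertext characters, advancing the index
theorem fillRow (ct : List Char) :
    ∀ (l : List Int) (row : List Char) (i0 : Int),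
      l.foldl (fun (st2 : List Char × Int) _ =>
          (st2.1 ++ [PySem.List.pyGetD ct st2.2 ' '], st2.2 + 1)) (row, i0)
      = (row ++ (List.range l.length).map (fun c : Nat => PySem.List.pyGetD ct (i0 + (c : Int)) ' '),
          i0 + l.length) := by
  intro l
  induction l with
  | nil => intro row i0; simp
  | cons x l ih =>
    intro row i0
    rw [List.foldl_cons, ih]
    simp only [List.length_cons, List.range_succ_eq_map, List.map_cons, List.map_map]
    rw [Prod.mk.injEq]
    constructor
    · rw [List.append_assoc]
      congr 1
      rw [List.singleton_append]
      congr 1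
      · congr 1
        omega
      · apply List.map_congr_left
        intro k _
        simp only [Function.comp_apply]
        congr 1
        push_cast
        ring
    · push_cast; ring

-- filling the whole table: reduced form first, then the let-form used by the port
theorem fillTable' (ct : List Char) (nC : Nat) :
    ∀ (l : List Int) (t : List (List Char)) (i0 : Int),
      l.foldl (fun (st : List (List Char) × Int) _ =>
          (st.1 ++ [[] ++ (List.range nC).map (fun c : Nat => PySem.List.pyGetD ct (st.2 + (c : Int)) ' ')],
            st.2 + (nC : Int))) (t, i0)
      = (t ++ (List.range l.length).map (fun r : Nat =>
            (List.range nC).map (fun c : Nat =>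
              PySem.List.pyGetD ct (i0 + (r : Int) * nC + (c : Int)) ' ')),
          i0 + l.length * nC) := by
  intro l
  induction l with
  | nil => intro t i0; simp
  | cons x l ih =>
    intro t i0
    rw [List.foldl_cons, ih]
    simp only [List.length_cons, List.range_succ_eq_map, List.map_cons, List.map_map,
      List.nil_append]
    rw [Prod.mk.injEq]
    constructor
    · rw [List.append_assoc, List.singleton_append]
      congr 1
      congr 1
      · apply List.map_congr_left
        intro c _
        congr 1
        push_cast
        ring
      · apply List.map_congr_left
        intro k _
        simp only [Function.comp_apply]
        apply List.map_congr_left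
        intro c _
        congr 1
        push_cast
        ring
    · push_cast; ring

theorem fillTable (ct : List Char) (nC : Nat) :
    ∀ (l : List Int) (t : List (List Char)) (i0 : Int),
      l.foldl (fun (st : List (List Char) × Int) _ =>
          let inner := (PySem.List.pyRange 0 nC).foldl
            (fun (st2 : List Char × Int) _ =>
              (st2.1 ++ [PySem.List.pyGetD ct st2.2 ' '], st2.2 + 1)) ([], st.2)
          (st.1 ++ [inner.1], inner.2)) (t, i0)
      = (t ++ (List.range l.length).map (fun r : Nat =>
            (List.range nC).map (fun c : Nat =>
              PySem.List.pyGetD ct (i0 + (r : Int) * nC + (c : Int)) ' ')),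
          i0 + l.length * nC) := by
  intro l t i0
  have hlen : (PySem.List.pyRange 0 (nC : Int)).length = nC := by
    rw [PySem.List.length_pyRange_one]; omega
  have hfun : (fun (st : List (List Char) × Int) (_ : Int) =>
      let inner := (PySem.List.pyRange 0 nC).foldl
        (fun (st2 : List Char × Int) _ =>
          (st2.1 ++ [PySem.List.pyGetD ct st2.2 ' '], st2.2 + 1)) ([], st.2)
      (st.1 ++ [inner.1], inner.2))
      = (fun (st : List (List Char) × Int) _ =>
          (st.1 ++ [[] ++ (List.range nC).map (fun c : Nat => PySem.List.pyGetD ct (st.2 + (c : Int)) ' ')],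
            st.2 + (nC : Int))) := by
    funext st r
    show ((st.1 ++ [_], _) : List (List Char) × Int) = _
    rw [fillRow ct (PySem.List.pyRange 0 (nC : Int)) [] st.2, hlen]
  rw [hfun, fillTable']

-- enumerate-driven sequential pySetD writes: overwrites positions s, s+1, … with xs.map f
theorem foldl_enum_pySetD {α β : Type} (f : β → α) :
    ∀ (xs : List β) (s : Nat) (t : List α), t.length = s + xs.length →
      (PySem.List.enumerate xs (s : Int)).foldl
          (fun t p => PySem.List.pySetD t p.1 (f p.2)) t
        = t.take s ++ xs.map f := by
  intro xs
  induction xs with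
  | nil =>
    intro s t ht
    simp only [PySem.List.enumerate, List.foldl_nil, List.map_nil, List.append_nil]
    exact (List.take_of_length_le (by simpa using ht.le)).symm
  | cons x xs ih =>
    intro s t ht
    have hs : s < t.length := by simp at ht; omega
    have hstep : PySem.List.enumerate (x :: xs) (s : Int)
        = ((s : Int), x) :: PySem.List.enumerate xs ((s : Int) + 1) := rfl
    rw [hstep, List.foldl_cons]
    have h1 : ((s : Int) + 1) = ((s + 1 : Nat) : Int) := by push_cast; ring
    have hset : PySem.List.pySetD t (s : Int) (f x) = t.set s (f x) := pySetD_nat t s (f x) hs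
    rw [hset, h1, ih (s + 1) _ (by simp at ht ⊢; omega)]
    have hset2 : t.set s (f x) = t.take s ++ f x :: t.drop (s + 1) := by
      rw [List.set_eq_take_append_cons_drop, if_pos hs]
    rw [hset2]
    have hl : (t.take s).length = s := by rw [List.length_take]; omega
    rw [show s + 1 = (t.take s).length + 1 from by omega, List.take_append]
    simp

-- the column-unpermutation double loop
theorem colUnperm (tab2 : List (List Char)) (inv_col : List Int) (nC : Nat)
    (hl : inv_col.length = nC) :
    ∀ (n s : Nat) (t : List (List Char)), t.length = s + n → (∀ row ∈ t, row.length = nC) →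
      (PySem.List.pyRange (s : Int) ((s : Int) + n)).foldl
          (fun t r => PySem.List.pySetD t r
            ((PySem.List.enumerate inv_col).foldl
              (fun row p => PySem.List.pySetD row p.1
                (PySem.List.pyGetD (PySem.List.pyGetD tab2 r []) p.2 ' '))
              (PySem.List.pyGetD t r []))) t
        = t.take s ++ (List.range n).map (fun k =>
            inv_col.map (fun old =>
              PySem.List.pyGetD (PySem.List.pyGetD tab2 ((s + k : Nat) : Int) []) old ' ')) := by
  intro n
  induction n with
  | zero =>
    intro s t ht _
    rw [PySem.List.pyRange_one_eq_nil (by push_cast; omega), List.foldl_nil]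
    simp only [List.range_zero, List.map_nil, List.append_nil]
    exact (List.take_of_length_le (by omega)).symm
  | succ n ih =>
    intro s t ht hrows
    have hs : s < t.length := by omega
    rw [PySem.List.pyRange_one_cons (by push_cast; omega), List.foldl_cons]
    -- the inner enumerate-fold rewrites the whole row
    have ht0 : (PySem.List.pyGetD t (s : Int) []).length = inv_col.length := by
      rw [PySem.List.pyGetD_ofNat t s [] hs, hl]
      exact hrows _ (List.getElem_mem hs)
    have hinner := foldl_enum_pySetD
      (fun old => PySem.List.pyGetD (PySem.List.pyGetD tab2 (s : Int) []) old ' ')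
      inv_col 0 (PySem.List.pyGetD t (s : Int) []) (by omega)
    simp only [Nat.cast_zero, List.take_zero, List.nil_append] at hinner
    rw [hinner]
    have hset : PySem.List.pySetD t (s : Int)
        (inv_col.map (fun old => PySem.List.pyGetD (PySem.List.pyGetD tab2 (s : Int) []) old ' '))
        = t.set s _ := pySetD_nat t s _ hs
    rw [hset]
    have harg1 : ((s : Int) + 1) = ((s + 1 : Nat) : Int) := by push_cast; ring
    have harg2 : ((s : Int) + ((n + 1 : Nat) : Int)) = (((s + 1 : Nat) : Int) + (n : Nat)) := by
      push_cast; ring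
    rw [harg1, harg2, ih (s + 1) _ (by simp; omega) ?_]
    · have hset2 : t.set s (inv_col.map (fun old =>
          PySem.List.pyGetD (PySem.List.pyGetD tab2 (s : Int) []) old ' '))
          = t.take s ++ (inv_col.map (fun old =>
              PySem.List.pyGetD (PySem.List.pyGetD tab2 (s : Int) []) old ' ')) :: t.drop (s + 1) := by
        rw [List.set_eq_take_append_cons_drop, if_pos hs]
      have hlt : (t.take s).length = s := by rw [List.length_take]; omega
      have htake : (t.take s ++ (inv_col.map (fun old =>
            PySem.List.pyGetD (PySem.List.pyGetD tab2 (s : Int) []) old ' ')) :: t.drop (s + 1)).take (s + 1)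
          = t.take s ++ [inv_col.map (fun old =>
              PySem.List.pyGetD (PySem.List.pyGetD tab2 (s : Int) []) old ' ')] := by
        rw [show s + 1 = (t.take s).length + 1 from by omega, List.take_append]
        congr 1
        · simp
        · simp [show (List.take s t).length + 1 - (List.take s t).length = 1 from by omega]
      rw [hset2, htake, List.append_assoc, List.singleton_append]
      simp only [List.range_succ_eq_map, List.map_cons, List.map_map, Function.comp_def,
        Nat.succ_eq_add_one]
      push_cast
      ring_nf
    · intro row hrow
      rcases List.mem_or_eq_of_mem_set hrow with h | h
      · exact hrows _ h
      · rw [h, List.length_map, hl]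


-- membership facts about enumerate of a sorted permutation of range n
theorem enum_sorted_mem (key : List Char) (n : Nat) :
    ∀ p ∈ PySem.List.enumerate
        (PySem.List.sorted (PySem.List.pyRange 0 (n : Int)) (fun k => PySem.List.pyGetD key k ' ')),
      (0 ≤ p.1 ∧ p.1 < (n : Int)) ∧ (0 ≤ p.2 ∧ p.2 < (n : Int)) := by
  intro p hp
  set sr := PySem.List.sorted (PySem.List.pyRange 0 (n : Int)) (fun k => PySem.List.pyGetD key k ' ') with hsr
  have hlen : sr.length = n := by
    rw [hsr, PySem.List.length_sorted, PySem.List.length_pyRange_one]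
    omega
  rw [PySem.List.enumerate_eq_map_pyRange sr 0] at hp
  simp only [List.mem_map] at hp
  obtain ⟨j, hj, rfl⟩ := hp
  rw [PySem.List.mem_pyRange_one] at hj
  have hjlen : (PySem.List.len sr) = (sr.length : Int) := by simp [PySem.List.len_eq]
  rw [hjlen, hlen] at hj
  refine ⟨⟨hj.1, hj.2⟩, ?_⟩
  have hmem : PySem.List.pyGetD sr j 0 ∈ sr := by
    apply PySem.List.pyGetD_mem
    simp only [PySem.Raise.InRange]
    omega
  have : PySem.List.pyGetD sr j 0 ∈ PySem.List.pyRange 0 (n : Int) :=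
    ((PySem.List.sorted_perm _ _ _).mem_iff).mp (hsr ▸ hmem)
  exact (PySem.List.mem_pyRange_one.mp this)

-- main-branch equality
theorem main_eq (ct ck rk : List Char) (hC : ck ≠ []) (hR : rk ≠ [])
    (hct : ct.length = rk.length * ck.length) :
    pyAmain ct ck rk = pyBmain ct ck rk := by
  have hnC : 0 < ck.length := List.length_pos_of_ne_nil hC
  have hnR : 0 < rk.length := List.length_pos_of_ne_nil hR
  unfold pyAmain pyBmain
  dsimp only
  rw [fillTable ct ck.length (PySem.List.pyRange 0 (rk.length : Int)) [] 0]
  simp only [PySem.List.length_pyRange_one, sub_zero, Int.toNat_natCast, List.nil_append]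
  -- abbreviations
  set TBL := List.map (fun r : Nat => List.map
      (fun c : Nat => PySem.List.pyGetD ct (0 + (r : Int) * (ck.length : Int) + (c : Int)) ' ')
      (List.range ck.length)) (List.range rk.length) with hTBL
  set srR := PySem.List.sorted (PySem.List.pyRange 0 (rk.length : Int))
      (fun k => PySem.List.pyGetD rk k ' ') with hsrR
  set srC := PySem.List.sorted (PySem.List.pyRange 0 (ck.length : Int))
      (fun k => PySem.List.pyGetD ck k ' ') with hsrC
  set IR := List.foldl (fun inv p => PySem.List.pySetD inv p.2 p.1)
      (List.replicate rk.length (0 : Int)) (PySem.List.enumerate srR) with hIR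
  set IC := List.foldl (fun inv p => PySem.List.pySetD inv p.2 p.1)
      (List.replicate ck.length (0 : Int)) (PySem.List.enumerate srC) with hIC
  set DR := List.foldl (fun d p => d.insert p.2 p.1) (PySem.Dict.empty : PySem.Dict Int Int)
      (PySem.List.enumerate srR) with hDR
  set DC := List.foldl (fun d p => d.insert p.2 p.1) (PySem.Dict.empty : PySem.Dict Int Int)
      (PySem.List.enumerate srC) with hDC
  -- basic facts
  have hmemR := enum_sorted_mem rk rk.length
  have hmemC := enum_sorted_mem ck ck.length
  rw [← hsrR] at hmemR
  rw [← hsrC] at hmemC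
  have hIRlen : IR.length = rk.length := by
    rw [hIR, length_foldl_pySetD (PySem.List.enumerate srR) (fun p : Int × Int => p.2)
      (fun p : Int × Int => p.1) (List.replicate rk.length (0 : Int)), List.length_replicate]
  have hIClen : IC.length = ck.length := by
    rw [hIC, length_foldl_pySetD (PySem.List.enumerate srC) (fun p : Int × Int => p.2)
      (fun p : Int × Int => p.1) (List.replicate ck.length (0 : Int)), List.length_replicate]
  have hIRmem : ∀ x ∈ IR, 0 ≤ x ∧ x < (rk.length : Int) := by
    rw [hIR]
    refine foldl_pySetD_inv _ _ ?_ ?_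
    · intro x hx
      rw [List.eq_of_mem_replicate hx]
      constructor <;> omega
    · intro p hp; exact (hmemR p hp).1
  have hICmem : ∀ x ∈ IC, 0 ≤ x ∧ x < (ck.length : Int) := by
    rw [hIC]
    refine foldl_pySetD_inv _ _ ?_ ?_
    · intro x hx
      rw [List.eq_of_mem_replicate hx]
      constructor <;> omega
    · intro p hp; exact (hmemC p hp).1
  have hagreeR : ∀ j : Nat, j < rk.length →
      PySem.List.pyGetD IR (j : Int) 0 = DR.getD (j : Int) 0 := by
    intro j hj
    rw [hIR, hDR]
    refine foldl_pySetD_dict_agree _ _ _ ?_ ?_ j (by simp [hj])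
    · intro p hp
      have := (hmemR p hp).2
      simp only [List.length_replicate]
      exact this
    · intro j' hj'; simp
  have hagreeC : ∀ j : Nat, j < ck.length →
      PySem.List.pyGetD IC (j : Int) 0 = DC.getD (j : Int) 0 := by
    intro j hj
    rw [hIC, hDC]
    refine foldl_pySetD_dict_agree _ _ _ ?_ ?_ j (by simp [hj])
    · intro p hp
      have := (hmemC p hp).2
      simp only [List.length_replicate]
      exact this
    · intro j' hj'; simp
  -- table after row unpermutation
  have hTA := foldl_enum_pySetD (fun old => PySem.List.pyGetD TBL old []) IR 0
    (List.replicate rk.length (List.replicate ck.length ' ')) (by simp [hIRlen])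
  simp only [Nat.cast_zero, List.take_zero, List.nil_append] at hTA
  rw [hTA]
  -- original table
  have hOT := colUnperm (IR.map fun old => PySem.List.pyGetD TBL old []) IC ck.length hIClen
    rk.length 0 (List.replicate rk.length (List.replicate ck.length ' '))
    (by simp) (by intro row hrow; rw [List.eq_of_mem_replicate hrow, List.length_replicate])
  simp only [Nat.cast_zero, zero_add, List.take_zero, List.nil_append] at hOT
  rw [hOT]
  -- flatten both reading loops
  simp only [PySem.List.foldl_append_singleton_eq_map, PySem.List.foldl_append_eq_flatMap,
    List.nil_append]
  refine List.flatMap_congr ?_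
  intro r hr
  rw [PySem.List.mem_pyRange_one] at hr
  refine List.map_congr_left ?_
  intro c hc
  rw [PySem.List.mem_pyRange_one] at hc
  -- pointwise equality
  have hrn : r = ((r.toNat : Nat) : Int) := by omega
  have hcn : c = ((c.toNat : Nat) : Int) := by omega
  have hrlt : r.toNat < rk.length := by omega
  have hclt : c.toNat < ck.length := by omega
  -- left side
  have h1 : PySem.List.pyGetD (List.map (fun k : Nat => IC.map fun old =>
        PySem.List.pyGetD (PySem.List.pyGetD (IR.map fun old => PySem.List.pyGetD TBL old []) (k : Int) []) old ' ')
        (List.range rk.length)) r []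
      = IC.map fun old => PySem.List.pyGetD
          (PySem.List.pyGetD (IR.map fun old => PySem.List.pyGetD TBL old []) ((r.toNat : Nat) : Int) []) old ' ' := by
    rw [hrn, PySem.List.pyGetD_ofNat _ _ _ (by simp [hrlt])]
    simp only [List.getElem_map, List.getElem_range, Int.toNat_natCast]
  rw [h1]
  set vR := IR[r.toNat]'(by omega) with hvR
  set vC := IC[c.toNat]'(by omega) with hvC
  have hvRb : 0 ≤ vR ∧ vR < (rk.length : Int) := hIRmem _ (List.getElem_mem _)
  have hvCb : 0 ≤ vC ∧ vC < (ck.length : Int) := hICmem _ (List.getElem_mem _)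
  have h2 : PySem.List.pyGetD (IR.map fun old => PySem.List.pyGetD TBL old []) ((r.toNat : Nat) : Int) []
      = PySem.List.pyGetD TBL vR [] := by
    rw [PySem.List.pyGetD_ofNat _ _ _ (by simp [hIRlen, hrlt])]
    simp only [List.getElem_map]
    rw [hvR]
  rw [h2]
  have h3 : PySem.List.pyGetD TBL vR []
      = List.map (fun c' : Nat => PySem.List.pyGetD ct (0 + (vR.toNat : Int) * (ck.length : Int) + (c' : Int)) ' ')
          (List.range ck.length) := by
    rw [hTBL, PySem.List.pyGetD_eq_getElem _ _ hvRb.1 (by simp; omega)]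
    simp only [List.getElem_map, List.getElem_range]
  have h4 : PySem.List.pyGetD (IC.map fun old => PySem.List.pyGetD (PySem.List.pyGetD TBL vR []) old ' ') c ' '
      = PySem.List.pyGetD (PySem.List.pyGetD TBL vR []) vC ' ' := by
    rw [hcn, PySem.List.pyGetD_ofNat _ _ _ (by simp [hIClen, hclt])]
    simp only [List.getElem_map]
    rw [hvC]
  rw [h4, h3]
  have h5 : PySem.List.pyGetD (List.map (fun c' : Nat =>
        PySem.List.pyGetD ct (0 + (vR.toNat : Int) * (ck.length : Int) + (c' : Int)) ' ') (List.range ck.length)) vC ' '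
      = PySem.List.pyGetD ct (0 + (vR.toNat : Int) * (ck.length : Int) + (vC.toNat : Int)) ' ' := by
    rw [PySem.List.pyGetD_eq_getElem _ _ hvCb.1 (by simp; omega)]
    simp only [List.getElem_map, List.getElem_range]
  rw [h5]
  -- right side
  have h6 : DR.getD r 0 = vR := by
    rw [hrn, ← hagreeR r.toNat hrlt, PySem.List.pyGetD_ofNat _ _ _ (by omega)]
  have h7 : DC.getD c 0 = vC := by
    rw [hcn, ← hagreeC c.toNat hclt, PySem.List.pyGetD_ofNat _ _ _ (by omega)]
  rw [h6, h7]
  congr 1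
  have hvRn : ((vR.toNat : Nat) : Int) = vR := Int.toNat_of_nonneg hvRb.1
  have hvCn : ((vC.toNat : Nat) : Int) = vC := Int.toNat_of_nonneg hvCb.1
  rw [hvRn, hvCn]
  ring

-- ===== VERDICT (by name: the statement is the Claim_ definition above) =====
theorem double_permutation_decrypt_spec : Claim_equal_double_permutation_decrypt := by
  intro ciphertext col_key_word row_key_word _ hpre
  unfold Spec_double_permutation_decrypt
  unfold double_permutation_decrypt double_permutation_decrypt_alt
  split_ifs with h1 h2
  · rfl
  · rfl
  · have hg : ¬ (col_key_word.toList = [] ∨ row_key_word.toList = []) := h1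
    rw [main_eq _ _ _ (fun h => hg (Or.inl h)) (fun h => hg (Or.inr h)) (by omega)]
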